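-- pv_equiv track=rewrite | github.com/aaronelledge/Ista131 | hw1.py | indices_second_biggest
-- ===== SOURCE A (Python) =====
-- def second_biggest(lol):
--     return sorted(element for row in lol for element in row)[-2] # taken from worksheet
--
-- def indices_second_biggest(lol):
--     if(len(lol[0]) == 1 and len(lol) == 1):
--         return [0,0]
--     loc = second_biggest(lol)
--     key = 0
--     key = second_biggest(lol)
--     for r in range(len(lol)):
--         for c in range(len(lol[r])):
--             if lol[r][c] == key:
--                 loc = [r,c]
--     return loc
-- ===== SOURCE B (Python) =====
-- def indices_second_biggest(lol):
--     if len(lol[0]) == 1 and len(lol) == 1: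
--         return [0, 0]
--     # single pass: track the two largest values (with multiplicity) instead of sorting
--     m1 = m2 = None
--     for row in lol:
--         for e in row:
--             if m1 is None or e >= m1:
--                 m1, m2 = e, m1
--             elif m2 is None or e > m2:
--                 m2 = e
--     # backward scan with early exit: first match from the end = last occurrence
--     for r in range(len(lol) - 1, -1, -1):
--         row = lol[r]
--         for c in range(len(row) - 1, -1, -1):
--             if row[c] == m2:
--                 return [r, c]
-- ===== Notes on version B (the rewrite author's own statement) =====
-- stated objective: faster
-- what changed: B drops the sort entirely: one pass keeps the two largest values (with multiplicity) to obtain the target, then a backward scan with early exit returns the first match from the end instead of A's full forward scan that overwrites the location; Pre_ excludes only inputs where A raises IndexError (empty outer list, or fewer than two elements outside the 1x1 case).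
import Mathlib
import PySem

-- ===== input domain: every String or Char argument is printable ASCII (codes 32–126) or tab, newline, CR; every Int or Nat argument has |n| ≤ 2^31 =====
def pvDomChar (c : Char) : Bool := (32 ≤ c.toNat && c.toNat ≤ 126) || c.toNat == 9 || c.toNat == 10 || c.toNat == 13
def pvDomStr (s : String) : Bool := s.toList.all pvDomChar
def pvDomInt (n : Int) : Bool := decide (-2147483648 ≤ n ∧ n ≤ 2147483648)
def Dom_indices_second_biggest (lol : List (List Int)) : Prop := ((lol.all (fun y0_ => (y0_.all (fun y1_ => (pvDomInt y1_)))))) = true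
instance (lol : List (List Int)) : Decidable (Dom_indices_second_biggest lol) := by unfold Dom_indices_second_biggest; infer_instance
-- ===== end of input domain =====

-- B replaces A's sort-then-full-forward-scan by a single top-two pass (no sort) for the target
-- value and a backward scan with early exit for its last occurrence (objective: alternative).

-- ===== PORT A =====
-- second_biggest(lol) = sorted(flattened)[-2]; none = IndexError (fewer than 2 elements)
def pv_second_biggest (lol : List (List Int)) : Option Int :=
  PySem.List.pyGet? (PySem.List.sorted (lol.flatMap (fun row => row)) (fun x => x) false) (-2)

def indices_second_biggest (lol : List (List Int)) : List Int :=
  match PySem.List.pyGet? lol 0 with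
  | none => []                                   -- IndexError on lol[0]
  | some row0 =>
    if row0.length = 1 ∧ lol.length = 1 then [0, 0]
    else
      match pv_second_biggest lol with
      | none => []                               -- IndexError in second_biggest
      | some key =>
        -- loc starts as the int key in Python; it is always overwritten (key occurs in the
        -- grid), so the initial [] is never the result
        (PySem.List.pyRange 0 (lol.length : Int) 1).foldl (fun loc r =>
          (PySem.List.pyRange 0 ((PySem.List.pyGetD lol r []).length : Int) 1).foldl
            (fun loc c =>
              if PySem.List.pyGetD (PySem.List.pyGetD lol r []) c 0 = key then [r, c] else loc)
            loc) []

-- ===== PORT B =====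
-- one step of B's top-two loop: the if/elif chain on (m1, m2)
def isbStep (s : Option Int × Option Int) (e : Int) : Option Int × Option Int :=
  if (match s.1 with | none => true | some v => decide (v ≤ e)) = true then (some e, s.1)
  else if (match s.2 with | none => true | some v => decide (v < e)) = true then (s.1, some e)
  else s

-- B's backward double loop with early return, as nested findSome? over the countdown ranges
def isb_scan (lol : List (List Int)) (key : Int) : Option (List Int) :=
  (PySem.List.pyRange ((lol.length : Int) - 1) (-1) (-1)).findSome? (fun r =>
    (PySem.List.pyRange (((PySem.List.pyGetD lol r []).length : Int) - 1) (-1) (-1)).findSome?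
      (fun c =>
        if PySem.List.pyGetD (PySem.List.pyGetD lol r []) c 0 = key then some [r, c] else none))

def indices_second_biggest_alt (lol : List (List Int)) : List Int :=
  match PySem.List.pyGet? lol 0 with
  | none => []                                   -- IndexError on lol[0]
  | some row0 =>
    if row0.length = 1 ∧ lol.length = 1 then [0, 0]
    else
      let st := lol.foldl (fun s row => row.foldl isbStep s) (none, none)
      match st.2 with
      | none => []      -- m2 is None (≤1 element): Python's scan never matches → falls off (outside Pre_)
      | some key => (isb_scan lol key).getD []   -- inside Pre_ the key occurs, so the scan returns

-- ===== PRECONDITION & SPEC =====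
-- Pre_ excludes exactly the inputs on which Python A raises IndexError: the empty outer list
-- (lol[0]), and grids other than the 1x1 special case with fewer than two elements in total
-- (sorted(...)[-2]).
def Pre_indices_second_biggest (lol : List (List Int)) : Prop :=
  lol ≠ [] ∧ ((lol.headI.length = 1 ∧ lol.length = 1) ∨ 2 ≤ (lol.flatMap (fun row => row)).length)
instance (lol : List (List Int)) : Decidable (Pre_indices_second_biggest lol) := by
  unfold Pre_indices_second_biggest; infer_instance
def pvWitness_indices_second_biggest : List (List Int) := [[1, 2]]
def Spec_indices_second_biggest (lol : List (List Int)) (out : List Int) : Prop := out = indices_second_biggest_alt lol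
instance (lol : List (List Int)) (out : List Int) : Decidable (Spec_indices_second_biggest lol out) := by unfold Spec_indices_second_biggest; infer_instance

-- ===== CLAIM (what is proved, stated in full; the proofs are below) =====
def Claim_equal_indices_second_biggest : Prop := ∀ (lol : List (List Int)), Dom_indices_second_biggest lol → Pre_indices_second_biggest lol → Spec_indices_second_biggest lol (indices_second_biggest lol)

-- ===== LEMMAS AND PROOFS =====

-- descending insertion and insertion sort (proof device characterising both programs' targets)
def pvInsD (e : Int) : List Int → List Int
  | [] => [e]
  | a :: t => if a ≤ e then e :: a :: t else a :: pvInsD e t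

def pvSortD (l : List Int) : List Int := l.foldl (fun s e => pvInsD e s) []

-- first two elements of a list, as B's (m1, m2) state
def pvPairOf : List Int → Option Int × Option Int
  | [] => (none, none)
  | [a] => (some a, none)
  | a :: b :: _ => (some a, some b)

theorem pvStep_pairOf (s : List Int) (e : Int) :
    isbStep (pvPairOf s) e = pvPairOf (pvInsD e s) := by
  match s with
  | [] => rfl
  | [a] =>
    by_cases h : a ≤ e <;> simp [isbStep, pvPairOf, pvInsD, h]
  | a :: b :: t =>
    by_cases h1 : a ≤ e
    · simp [isbStep, pvPairOf, pvInsD, h1]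
    · by_cases h2 : b ≤ e
      · by_cases h3 : b < e
        · simp [isbStep, pvPairOf, pvInsD, h1, h2, h3]
        · simp [isbStep, pvPairOf, pvInsD, h1, h2, h3]; omega
      · have h3 : ¬ b < e := by omega
        simp [isbStep, pvPairOf, pvInsD, h1, h2, h3]

theorem pvFold_pairOf (l : List Int) (s : List Int) :
    l.foldl isbStep (pvPairOf s) = pvPairOf (l.foldl (fun s e => pvInsD e s) s) := by
  induction l generalizing s with
  | nil => rfl
  | cons e l ih => simp only [List.foldl_cons, pvStep_pairOf, ih]

theorem pvInsD_perm (e : Int) (s : List Int) : (pvInsD e s).Perm (e :: s) := by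
  induction s with
  | nil => rfl
  | cons a t ih =>
    by_cases h : a ≤ e
    · simp [pvInsD, h]
    · simp only [pvInsD, if_neg h]
      exact (ih.cons a).trans (List.Perm.swap e a t)

theorem pvSortD_perm (l : List Int) : ∀ s : List Int,
    (l.foldl (fun s e => pvInsD e s) s).Perm (l ++ s) := by
  induction l with
  | nil => intro s; simp
  | cons e l ih =>
    intro s
    simp only [List.foldl_cons]
    exact (ih (pvInsD e s)).trans (((pvInsD_perm e s).append_left l).trans List.perm_middle)

theorem pvInsD_pairwise (e : Int) (s : List Int) (h : s.Pairwise (fun a b => b ≤ a)) :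
    (pvInsD e s).Pairwise (fun a b => b ≤ a) := by
  induction s with
  | nil => simp [pvInsD]
  | cons a t ih =>
    rcases List.pairwise_cons.mp h with ⟨ha, ht⟩
    by_cases hae : a ≤ e
    · simp only [pvInsD, if_pos hae]
      refine List.pairwise_cons.mpr ⟨?_, h⟩
      intro x hx
      rcases List.mem_cons.mp hx with rfl | hx'
      · exact hae
      · exact le_trans (ha x hx') hae
    · simp only [pvInsD, if_neg hae]
      refine List.pairwise_cons.mpr ⟨?_, ih ht⟩
      intro x hx
      have hx' := (pvInsD_perm e t).mem_iff.mp hx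
      rcases List.mem_cons.mp hx' with rfl | hx''
      · omega
      · exact ha x hx''

theorem pvSortD_pairwise (l : List Int) : (pvSortD l).Pairwise (fun a b => b ≤ a) := by
  unfold pvSortD
  suffices h : ∀ s : List Int, s.Pairwise (fun a b => b ≤ a) →
      (l.foldl (fun s e => pvInsD e s) s).Pairwise (fun a b => b ≤ a) by
    exact h [] (by simp)
  induction l with
  | nil => intro s hs; exact hs
  | cons e l ih => intro s hs; exact ih _ (pvInsD_pairwise e s hs)

-- the ascending Python sort is the reverse of the descending insertion sort
theorem pv_sorted_eq_rev_sortD (l : List Int) :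
    PySem.List.sorted l (fun x => x) false = (pvSortD l).reverse := by
  apply PySem.List.sorted_id_eq_of_perm_of_pairwise
  · exact (pvSortD l).reverse_perm.trans (by simpa [pvSortD] using pvSortD_perm l [])
  · simpa [List.pairwise_reverse] using pvSortD_pairwise l

-- the grid's cells in scan order, as ((r, c), value)
def pvCells (lol : List (List Int)) : List ((Int × Int) × Int) :=
  (PySem.List.enumerate lol 0).flatMap (fun p =>
    (PySem.List.enumerate p.2 0).map (fun q => ((p.1, q.1), q.2)))

-- A's nested range/index loop is the fold of its body over the cells list
theorem pvA_loop_eq (lol : List (List Int)) (key : Int) (init : List Int) :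
    (PySem.List.pyRange 0 (lol.length : Int) 1).foldl (fun loc r =>
          (PySem.List.pyRange 0 ((PySem.List.pyGetD lol r []).length : Int) 1).foldl
            (fun loc c =>
              if PySem.List.pyGetD (PySem.List.pyGetD lol r []) c 0 = key then [r, c] else loc)
            loc) init
      = (pvCells lol).foldl (fun loc pc => if pc.2 = key then [pc.1.1, pc.1.2] else loc) init := by
  unfold pvCells
  rw [List.flatMap_def, List.foldl_flatten, List.foldl_map]
  rw [PySem.List.enumerate_eq_map_pyRange lol ([] : List Int), List.foldl_map]
  apply PySem.List.foldl_congr_mem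
  intro loc r _
  rw [PySem.List.enumerate_eq_map_pyRange (PySem.List.pyGetD lol r []) (0 : Int),
      List.map_map, List.foldl_map]
  rfl

-- B's nested flat fold is the top-two fold over the flattened grid
theorem pvB_fold_flat (lol : List (List Int)) (s : Option Int × Option Int) :
    lol.foldl (fun s row => row.foldl isbStep s) s
      = (lol.flatMap (fun row => row)).foldl isbStep s := by
  induction lol generalizing s with
  | nil => rfl
  | cons r rs ih => simp [List.foldl_append, ih]

theorem pv_findSome?_flatMap {α β γ : Type} (l : List α) (f : α → List β) (g : β → Option γ) :
    (l.flatMap f).findSome? g = l.findSome? (fun a => (f a).findSome? g) := by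
  induction l with
  | nil => rfl
  | cons a t ih =>
    rw [List.flatMap_cons, List.findSome?_append, List.findSome?_cons]
    cases h : (f a).findSome? g with
    | none => simpa using ih
    | some v => simp [h]

-- last-match foldl = first match over the reversed list
theorem pv_foldl_last_eq_findSome?_rev {α β : Type} (P : α → Prop) [DecidablePred P] (f : α → β)
    (l : List α) (init : β) :
    l.foldl (fun acc pc => if P pc then f pc else acc) init
      = (l.reverse.findSome? (fun pc => if P pc then some (f pc) else none)).getD init := by
  induction l generalizing init with
  | nil => rfl
  | cons p t ih =>
    rw [List.foldl_cons, ih, List.reverse_cons, List.findSome?_append]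
    cases h : t.reverse.findSome? (fun pc => if P pc then some (f pc) else none) with
    | some v => simp [h]
    | none => by_cases hp : P p <;> simp [hp]

theorem pv_findSome?_ext {α β : Type} (l : List α) (f g : α → Option β)
    (h : ∀ a ∈ l, f a = g a) : l.findSome? f = l.findSome? g := by
  induction l with
  | nil => rfl
  | cons a t ih =>
    rw [List.findSome?_cons, List.findSome?_cons, h a (List.mem_cons_self), ih]
    intro x hx; exact h x (List.mem_cons_of_mem a hx)

-- B's backward scan is the first match over the reversed cells list
theorem pvB_scan_eq (lol : List (List Int)) (key : Int) :
    isb_scan lol key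
      = (pvCells lol).reverse.findSome?
          (fun pc => if pc.2 = key then some [pc.1.1, pc.1.2] else none) := by
  unfold isb_scan pvCells
  rw [List.reverse_flatMap, pv_findSome?_flatMap]
  rw [PySem.List.enumerate_eq_map_pyRange lol ([] : List Int)]
  rw [← List.map_reverse, List.findSome?_map]
  have hr : PySem.List.pyRange ((lol.length : Int) - 1) (-1) (-1)
      = (PySem.List.pyRange 0 (lol.length : Int) 1).reverse := by
    rw [PySem.List.pyRange_neg_one_eq_reverse]; norm_num
  rw [hr]
  apply pv_findSome?_ext
  intro r _
  dsimp only [Function.comp]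
  rw [PySem.List.enumerate_eq_map_pyRange (PySem.List.pyGetD lol r []) (0 : Int),
      List.map_map, ← List.map_reverse, List.findSome?_map]
  have hc : PySem.List.pyRange (((PySem.List.pyGetD lol r []).length : Int) - 1) (-1) (-1)
      = (PySem.List.pyRange 0 ((PySem.List.pyGetD lol r []).length : Int) 1).reverse := by
    rw [PySem.List.pyRange_neg_one_eq_reverse]; norm_num
  rw [hc]
  rfl

-- ===== VERDICT (by name: the statement is the Claim_ definition above) =====
theorem indices_second_biggest_spec : Claim_equal_indices_second_biggest := by
  intro lol _ hpre
  obtain ⟨hne, hcase⟩ := hpre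
  unfold Spec_indices_second_biggest indices_second_biggest indices_second_biggest_alt
     pv_second_biggest
  cases h0 : PySem.List.pyGet? lol 0 with
  | none => rfl
  | some row0 =>
    dsimp only
    by_cases hg : row0.length = 1 ∧ lol.length = 1
    · simp [hg]
    · rw [if_neg hg, if_neg hg]
      -- inside Pre_ and outside the guard the grid has ≥ 2 elements
      have hlen : 2 ≤ (lol.flatMap (fun row => row)).length := by
        rcases hcase with h1x1 | h2
        · exfalso; apply hg
          have hhead : lol.headI = row0 := by
            cases lol with
            | nil => exact absurd rfl hne
            | cons r rs =>
              have h0' := h0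
              simp only [PySem.List.pyGet?_zero_cons, Option.some.injEq] at h0'
              simpa [List.headI] using h0'
          exact ⟨hhead ▸ h1x1.1, h1x1.2⟩
        · exact h2
      -- the descending sort of the flattened grid has shape a :: b :: t
      have hsd : 2 ≤ (pvSortD (lol.flatMap (fun row => row))).length := by
        have heq : (pvSortD (lol.flatMap (fun row => row))).length
            = (lol.flatMap (fun row => row)).length := by
          simpa [pvSortD] using (pvSortD_perm (lol.flatMap (fun row => row)) []).length_eq
        rw [heq]; exact hlen
      obtain ⟨a, b, t, hshape⟩ : ∃ a b t, pvSortD (lol.flatMap (fun row => row)) = a :: b :: t := by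
        match hsdl : pvSortD (lol.flatMap (fun row => row)) with
        | [] => rw [hsdl] at hsd; simp at hsd
        | [x] => rw [hsdl] at hsd; simp at hsd
        | x :: y :: t => exact ⟨x, y, t, rfl⟩
      -- A's key: sorted(flat)[-2] = b
      have hkeyA : PySem.List.pyGet?
          (PySem.List.sorted (lol.flatMap (fun row => row)) (fun x => x) false) (-2) = some b := by
        rw [pv_sorted_eq_rev_sortD, hshape]
        have hlenx : ((a :: b :: t).reverse).length = t.length + 2 := by simp
        rw [PySem.List.pyGet?_neg_ofNat _ 2 (by norm_num) (by rw [hlenx]; omega)]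
        rw [hlenx, List.reverse_cons, List.reverse_cons,
            show t.length + 2 - 2 = (t.reverse ++ [b]).length - 1 by simp]
        have : t.reverse ++ [b] ++ [a] = t.reverse ++ [b, a] := by simp
        rw [this, show (t.reverse ++ [b]).length - 1 = t.reverse.length by simp,
            List.getElem?_append_right (le_refl _)]
        simp
      rw [hkeyA]
      dsimp only
      -- B's state: pairOf of the descending sort, so m2 = some b
      have hst : lol.foldl (fun s row => row.foldl isbStep s) (none, none)
          = (some a, some b) := by
        rw [pvB_fold_flat]
        have h0' : ((none, none) : Option Int × Option Int) = pvPairOf [] := rfl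
        rw [h0', pvFold_pairOf]
        show pvPairOf (pvSortD (lol.flatMap (fun row => row))) = _
        rw [hshape]; rfl
      rw [hst]
      dsimp only
      rw [pvA_loop_eq, pvB_scan_eq,
          pv_foldl_last_eq_findSome?_rev (fun pc : (Int × Int) × Int => pc.2 = b)
            (fun pc => [pc.1.1, pc.1.2])]
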